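-- pv_equiv track=rewrite | github.com/krailis/99-Problems | Python/Lists/p01_to_p10_solutions/solutions_1_10.py | s9_packConsecutiveDuplicates
-- ===== SOURCE A (Python) =====
-- def s9_packConsecutiveDuplicates (list_a):
-- 	packList = []
-- 	subList = []
-- 	l = len(list_a)-1
-- 	while True:
-- 		# Pop the first element of input list at every iteration
-- 		# and append it to the sublist
-- 		x = list_a.pop(0)
-- 		subList.append(x)
-- 		if (list_a != []):
-- 			# As long as the input list is not empty compare
-- 			# the popped element with the new first element
-- 			if (x != list_a[0]):
-- 				packList.append(subList)
-- 				subList = []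
-- 		else:
-- 			packList.append(subList)
-- 			break
--
-- 	return packList
-- ===== SOURCE B (Python) =====
-- def s9_packConsecutiveDuplicates(list_a):
--     packList = []
--     for x in list_a:
--         if packList and packList[-1][-1] == x:
--             packList[-1].append(x)
--         else:
--             packList.append([x])
--     return packList
-- ===== Notes on version B (the rewrite author's own statement) =====
-- stated objective: faster
-- what changed: Replaced the destructive loop that pops the front of the list (an O(n) shift per element) with a single non-mutating forward pass that appends each element to the last group or starts a new one.
-- outside the precondition, e.g. on s9_packConsecutiveDuplicates([]): A raises IndexError, B returns []
import Mathlib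
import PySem

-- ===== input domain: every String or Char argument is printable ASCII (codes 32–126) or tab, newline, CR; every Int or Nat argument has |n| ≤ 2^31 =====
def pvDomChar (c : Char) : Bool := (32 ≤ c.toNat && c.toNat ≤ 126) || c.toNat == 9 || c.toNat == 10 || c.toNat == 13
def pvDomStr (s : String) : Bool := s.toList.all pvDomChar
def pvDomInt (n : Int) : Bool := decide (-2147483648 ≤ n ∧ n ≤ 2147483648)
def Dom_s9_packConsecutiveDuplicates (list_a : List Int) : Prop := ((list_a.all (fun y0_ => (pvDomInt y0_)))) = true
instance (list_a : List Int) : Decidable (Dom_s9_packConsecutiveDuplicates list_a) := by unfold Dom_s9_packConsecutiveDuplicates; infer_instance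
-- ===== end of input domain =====

-- B replaces A's destructive pop(0) loop by one non-mutating forward pass (faster per the timing
-- run); A empties its argument list in place, so the equivalence is about the RETURN value only.

-- ===== PORT A =====
-- A's while-True loop: at each turn pop the head x, append it to subList, and either flush
-- subList (next element differs), keep going, or flush and break (list exhausted).
def pvALoop : List Int → List Int → List (List Int) → List (List Int)
  | [], _, packList => packList  -- unreachable: the loop breaks when the popped element was the last
  | x :: rest, subList, packList =>
      let subList' := subList ++ [x]
      match rest with
      | [] => packList ++ [subList']
      | y :: _ =>
          if x ≠ y then pvALoop rest [] (packList ++ [subList'])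
          else pvALoop rest subList' packList

def s9_packConsecutiveDuplicates (list_a : List Int) : List (List Int) :=
  pvALoop list_a [] []

-- ===== PORT B =====
-- B's body: append x to the last group if its last element equals x, else start a new group.
def pvBStep (packList : List (List Int)) (x : Int) : List (List Int) :=
  match packList.getLast? with
  | none => [[x]]
  | some g => if g.getLast? = some x then packList.dropLast ++ [g ++ [x]] else packList ++ [[x]]

def s9_packConsecutiveDuplicates_alt (list_a : List Int) : List (List Int) :=
  list_a.foldl pvBStep []

-- ===== PRECONDITION & SPEC =====
-- Pre_ excludes only the empty list, on which A raises IndexError (pop from empty list).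
def Pre_s9_packConsecutiveDuplicates (list_a : List Int) : Prop := list_a ≠ []
instance (list_a : List Int) : Decidable (Pre_s9_packConsecutiveDuplicates list_a) := by unfold Pre_s9_packConsecutiveDuplicates; infer_instance
def pvWitness_s9_packConsecutiveDuplicates : List Int := [1, 1, 2]

def Spec_s9_packConsecutiveDuplicates (list_a : List Int) (out : List (List Int)) : Prop := out = s9_packConsecutiveDuplicates_alt list_a
instance (list_a : List Int) (out : List (List Int)) : Decidable (Spec_s9_packConsecutiveDuplicates list_a out) := by unfold Spec_s9_packConsecutiveDuplicates; infer_instance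

-- ===== CLAIM (what is proved, stated in full; the proofs are below) =====
def Claim_equal_s9_packConsecutiveDuplicates : Prop := ∀ (list_a : List Int), Dom_s9_packConsecutiveDuplicates list_a → Pre_s9_packConsecutiveDuplicates list_a → Spec_s9_packConsecutiveDuplicates list_a (s9_packConsecutiveDuplicates list_a)

-- ===== LEMMAS AND PROOFS =====

-- last element of the last group of a foldl state
def pvLastLast (packList : List (List Int)) : Option Int :=
  packList.getLast?.bind List.getLast?

lemma pvBStep_new (packList : List (List Int)) (x : Int)
    (h : pvLastLast packList ≠ some x) : pvBStep packList x = packList ++ [[x]] := by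
  unfold pvBStep
  cases hl : packList.getLast? with
  | none => simp [List.getLast?_eq_none_iff.mp hl]
  | some g =>
      simp only [pvLastLast, hl, Option.bind_some] at h
      simp [h]

lemma pvBStep_grow (packList : List (List Int)) (g : List Int) (x : Int)
    (h : g.getLast? = some x) : pvBStep (packList ++ [g]) x = packList ++ [g ++ [x]] := by
  unfold pvBStep
  simp [h]

-- A's loop, started with a pending group consistent with the head of the remaining list,
-- computes B's fold from the corresponding fold state.
lemma pvALoop_foldl : ∀ (l : List Int) (subList : List Int) (packList : List (List Int)),
    l ≠ [] →
    (subList = [] → ∀ y, l.head? = some y → pvLastLast packList ≠ some y) →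
    (subList ≠ [] → subList.getLast? = l.head?) →
    pvALoop l subList packList =
      List.foldl pvBStep (if subList = [] then packList else packList ++ [subList]) l := by
  intro l
  induction l with
  | nil => intro _ _ h; exact absurd rfl h
  | cons x rest ih =>
      intro subList packList _ hnew hgrow
      have hstep : pvBStep (if subList = [] then packList else packList ++ [subList]) x
          = packList ++ [subList ++ [x]] := by
        by_cases hs : subList = []
        · subst hs
          rw [if_pos rfl, pvBStep_new packList x (hnew rfl x rfl)]
          simp
        · simp only [if_neg hs]
          have := hgrow hs
          simp only [List.head?] at this
          exact pvBStep_grow packList subList x this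
      have hlast : (subList ++ [x]).getLast? = some x := by simp
      show (let subList' := subList ++ [x];
        match rest with
        | [] => packList ++ [subList']
        | y :: _ =>
            if x ≠ y then pvALoop rest [] (packList ++ [subList'])
            else pvALoop rest subList' packList) = _
      cases rest with
      | nil => simp [List.foldl, hstep]
      | cons y t =>
          simp only [List.foldl, hstep]
          by_cases hxy : x = y
          · subst hxy
            simp only [ne_eq, not_true_eq_false, if_false]
            have := ih (subList ++ [x]) packList (by simp)
              (by intro h; simp at h)
              (fun _ => by simp)
            simpa using this
          · simp only [ne_eq, hxy, not_false_eq_true, if_true]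
            have := ih [] (packList ++ [subList ++ [x]]) (by simp)
              (by
                intro _ z hz
                simp only [List.head?] at hz
                injection hz with hz; subst hz
                simp [pvLastLast, hlast]
                intro h; exact hxy h)
              (fun h => absurd rfl h)
            simpa using this

-- ===== VERDICT (by name: the statement is the Claim_ definition above) =====
theorem s9_packConsecutiveDuplicates_spec : Claim_equal_s9_packConsecutiveDuplicates := by
  intro l _ hpre
  unfold Spec_s9_packConsecutiveDuplicates s9_packConsecutiveDuplicates s9_packConsecutiveDuplicates_alt
  have := pvALoop_foldl l [] [] hpre
    (by intro _ y _; simp [pvLastLast])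
    (fun h => absurd rfl h)
  simpa using this
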